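-- pv_equiv track=rewrite | github.com/jangleloom/logs-analysis | src/detect_sudo.py | severity_commands
-- ===== SOURCE A (Python) =====
-- def severity_commands(command: str) -> str:
--     cmd = command.lower()
--
--     # List of dictionaries
--     RULES = [
--         {
--             "category": "Credential Access",
--             "severity": "Critical",
--             "patterns":
--             [
--                 "/etc/shadow",
--                 "/root/.ssh",
--                 ".ssh/id_rsa"
--             ]
--         },
--
--         {
--             "category": "Persistence",
--             "severity": "High",
--             "patterns": [
--                 "/etc/sudoers",
--                 "crontab",
--                 "useradd"
--             ]
--         },
--
--         {
--             "category": "Download and Execute",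
--             "severity": "Medium",
--             "patterns": [
--                 "curl", "wget"
--             ]
--         }
--     ]
--
--     for rule in RULES:
--         for pattern in rule["patterns"]:
--             if pattern in cmd:
--                 #return tuple
--                 return rule["severity"], rule["category"]
--     return None # Benign command
-- ===== SOURCE B (Python) =====
-- # Position-major scan: walks the command once left-to-right and, at each position,
-- # checks which pattern starts there, keeping the highest-priority (lowest-index) hit.
-- _PATTERNS = ["/etc/shadow", "/root/.ssh", ".ssh/id_rsa",
--              "/etc/sudoers", "crontab", "useradd", "curl", "wget"]
-- _RESULTS = [("Critical", "Credential Access")] * 3 + \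
--            [("High", "Persistence")] * 3 + \
--            [("Medium", "Download and Execute")] * 2
--
-- def severity_commands(command: str) -> str:
--     cmd = command.lower()
--     best = len(_PATTERNS)
--     for i in range(len(cmd)):
--         for k in range(best):
--             if cmd.startswith(_PATTERNS[k], i):
--                 best = k
--                 break
--     return _RESULTS[best] if best < len(_PATTERNS) else None
-- ===== Notes on version B (the rewrite author's own statement) =====
-- stated objective: alternative
-- what changed: Replaces A's pattern-major nested substring scan with a position-major single left-to-right walk of the command that checks which pattern starts at each position and keeps the lowest-index (highest-priority) hit via a shrinking min accumulator.
import Mathlib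
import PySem

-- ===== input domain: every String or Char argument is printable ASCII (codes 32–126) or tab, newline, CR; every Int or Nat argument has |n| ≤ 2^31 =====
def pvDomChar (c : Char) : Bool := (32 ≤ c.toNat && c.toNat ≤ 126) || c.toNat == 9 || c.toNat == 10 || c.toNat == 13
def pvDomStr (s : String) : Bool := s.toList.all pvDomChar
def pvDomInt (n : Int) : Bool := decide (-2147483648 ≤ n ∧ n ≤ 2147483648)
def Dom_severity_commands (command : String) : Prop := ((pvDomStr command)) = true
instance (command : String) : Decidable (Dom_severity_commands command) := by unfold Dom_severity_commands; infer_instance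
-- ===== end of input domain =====

-- B scans the command position by position (startswith at each index), keeping the
-- highest-priority hit, instead of A's pattern-major nested substring loops (alternative; same cost).

-- ===== PORT A =====
-- inner 'for pattern in rule["patterns"]' loop of A
def pvInnerA (cmd sev cat : String) : List String → Option (String × String)
  | [] => none
  | p :: ps => if PySem.Str.isIn p cmd then some (sev, cat) else pvInnerA cmd sev cat ps

-- outer 'for rule in RULES' loop of A
def pvOuterA (cmd : String) : List (String × String × List String) → Option (String × String)
  | [] => none
  | (cat, sev, pats) :: rest =>
    match pvInnerA cmd sev cat pats with
    | some r => some r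
    | none => pvOuterA cmd rest

def severity_commands (command : String) : Option (String × String) :=
  let cmd := PySem.Str.lower command
  pvOuterA cmd
    [ ("Credential Access", "Critical", ["/etc/shadow", "/root/.ssh", ".ssh/id_rsa"]),
      ("Persistence", "High", ["/etc/sudoers", "crontab", "useradd"]),
      ("Download and Execute", "Medium", ["curl", "wget"]) ]

-- ===== PORT B =====
-- _PATTERNS (as char lists: string facts are proved on the list side)
def pvPats : List (List Char) :=
  [ "/etc/shadow".toList, "/root/.ssh".toList, ".ssh/id_rsa".toList,
    "/etc/sudoers".toList, "crontab".toList, "useradd".toList,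
    "curl".toList, "wget".toList ]

-- _RESULTS
def pvResults : List (String × String) :=
  [ ("Critical", "Credential Access"), ("Critical", "Credential Access"), ("Critical", "Credential Access"),
    ("High", "Persistence"), ("High", "Persistence"), ("High", "Persistence"),
    ("Medium", "Download and Execute"), ("Medium", "Download and Execute") ]

-- inner 'for k in range(best): if cmd.startswith(_PATTERNS[k], i): best = k; break'
-- (cmd.startswith(p, i) with 0 ≤ i ≤ len(cmd) is exactly Chars.startswith of the i-suffix)
def pvInnerB (tail : List Char) : List Nat → Nat → Nat
  | [], best => best
  | k :: ks, best =>
    if PySem.Chars.startswith tail (pvPats.getD k []) then k else pvInnerB tail ks best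

def severity_commands_alt (command : String) : Option (String × String) :=
  let cs := PySem.Chars.lower command.toList
  let best := (List.range cs.length).foldl (fun b i => pvInnerB (cs.drop i) (List.range b) b) pvPats.length
  if best < pvPats.length then some (pvResults.getD best ("", "")) else none

-- ===== PRECONDITION & SPEC =====
def Spec_severity_commands (command : String) (out : Option (String × String)) : Prop := out = severity_commands_alt command
instance (command : String) (out : Option (String × String)) : Decidable (Spec_severity_commands command out) := by unfold Spec_severity_commands; infer_instance

-- ===== CLAIM (what is proved, stated in full; the proofs are below) =====
def Claim_equal_severity_commands : Prop := ∀ (command : String), Dom_severity_commands command → Spec_severity_commands command (severity_commands command)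

-- ===== LEMMAS AND PROOFS =====

-- index of the first pattern that starts at the head of `tail` (8 if none)
def pvMAt (tail : List Char) : Nat :=
  (((List.range 8).find? (fun k => PySem.Chars.startswith tail (pvPats.getD k []))).getD 8)

-- index of the first pattern occurring anywhere in cs (8 if none)
def pvM (cs : List Char) : Nat :=
  (((List.range 8).find? (fun k => PySem.Chars.isIn (pvPats.getD k []) cs)).getD 8)

-- the inner loop is a find?-with-default
theorem pvInnerB_eq_find? (tail : List Char) (ks : List Nat) (b : Nat) :
    pvInnerB tail ks b = ((ks.find? (fun k => PySem.Chars.startswith tail (pvPats.getD k []))).getD b) := by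
  induction ks with
  | nil => rfl
  | cons k ks ih => simp only [pvInnerB, List.find?]; split <;> simp_all

-- find? over range n returns the least index satisfying p (getD n form)
theorem find?_range_le (n : Nat) (p : Nat → Bool) :
    ∀ k, k < n → p k = true → (((List.range n).find? p).getD n) ≤ k := by
  induction n with
  | zero => omega
  | succ m ih =>
    intro k hk hp
    rw [List.range_succ, List.find?_append]
    cases hfm : (List.range m).find? p with
    | some j =>
      have hj := List.mem_range.mp (List.mem_of_find?_eq_some hfm)
      have hjk : j ≤ k := by
        by_cases hkm : k < m
        · have := ih k hkm hp; rw [hfm] at this; simpa using this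
        · omega
      simp [Option.or]; omega
    | none =>
      have hkm : k = m := by
        rcases Nat.lt_succ_iff_lt_or_eq.mp hk with h | h
        · exact absurd hp (by simpa using (List.find?_eq_none.mp hfm k (List.mem_range.mpr h)))
        · exact h
      subst hkm
      simp [Option.or, List.find?, hp]

theorem find?_range_getD_le (n : Nat) (p : Nat → Bool) :
    (((List.range n).find? p).getD n) ≤ n := by
  cases hfm : (List.range n).find? p with
  | some j =>
    have := List.mem_range.mp (List.mem_of_find?_eq_some hfm)
    simp; omega
  | none => simp

theorem find?_range_sat {n : Nat} {p : Nat → Bool}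
    (h : (((List.range n).find? p).getD n) < n) :
    p (((List.range n).find? p).getD n) = true := by
  cases hfm : (List.range n).find? p with
  | some j => simpa using List.find?_some hfm
  | none => simp [hfm] at h

-- one step of the outer loop is a min with pvMAt
theorem pvStep_eq_min (tail : List Char) (b : Nat) (hb : b ≤ 8) :
    pvInnerB tail (List.range b) b = min b (pvMAt tail) := by
  rw [pvInnerB_eq_find?, pvMAt]
  set p : Nat → Bool := fun k => PySem.Chars.startswith tail (pvPats.getD k []) with hp
  cases hfb : (List.range b).find? p with
  | some j =>
    have hj : j < b := List.mem_range.mp (List.mem_of_find?_eq_some hfb)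
    have hpj := List.find?_some hfb
    have h1 : (((List.range 8).find? p).getD 8) ≤ j := find?_range_le 8 p j (by omega) hpj
    have h2 : p (((List.range 8).find? p).getD 8) = true := find?_range_sat (by omega)
    have h3 : (((List.range b).find? p).getD b) ≤ (((List.range 8).find? p).getD 8) :=
      find?_range_le b p _ (by omega) h2
    rw [hfb] at h3
    simp only [Option.getD_some] at h3 ⊢
    omega
  | none =>
    have h8 : ∀ k < 8, p k = true → b ≤ k := by
      intro k hk hpk
      by_contra hlt
      push Not at hlt
      exact absurd hpk (by simpa using List.find?_eq_none.mp hfb k (List.mem_range.mpr hlt))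
    cases hf8 : (List.range 8).find? p with
    | some j =>
      have hj : j < 8 := List.mem_range.mp (List.mem_of_find?_eq_some hf8)
      have := h8 j hj (List.find?_some hf8)
      simp only [Option.getD_some, Option.getD_none]
      omega
    | none => simp only [Option.getD_none]; omega


theorem severity_commands_eq_spec (command : String) :
    severity_commands command =
      if pvM (PySem.Chars.lower command.toList) < 8
      then some (pvResults.getD (pvM (PySem.Chars.lower command.toList)) ("", ""))
      else none := by
  simp only [severity_commands, pvOuterA, pvInnerA, pvM, pvPats, pvResults]
  have h8 : List.range 8 = [0, 1, 2, 3, 4, 5, 6, 7] := rfl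
  rw [h8]
  simp only [List.find?, List.getD, PySem.Str.isIn_eq, PySem.Str.toList_lower,
    List.getElem?_cons_zero, List.getElem?_cons_succ, Option.getD_some]
  split_ifs <;> simp_all

-- the outer loop is a fold of mins
theorem pvFold_eq_min_fold (cs : List Char) (L : List Nat) (b : Nat) (hb : b ≤ 8) :
    L.foldl (fun b i => pvInnerB (cs.drop i) (List.range b) b) b
      = L.foldl (fun a i => min a (pvMAt (cs.drop i))) b := by
  induction L generalizing b with
  | nil => rfl
  | cons i L ih =>
    simp only [List.foldl_cons]
    rw [pvStep_eq_min _ _ hb]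
    exact ih _ (by omega)

theorem foldl_min_le_init (g : Nat → Nat) (L : List Nat) (b : Nat) :
    L.foldl (fun a i => min a (g i)) b ≤ b := by
  induction L generalizing b with
  | nil => simp
  | cons i L ih => simp only [List.foldl_cons]; exact le_trans (ih _) (by omega)

theorem foldl_min_le_mem (g : Nat → Nat) (L : List Nat) (b : Nat) :
    ∀ i ∈ L, L.foldl (fun a i => min a (g i)) b ≤ g i := by
  induction L generalizing b with
  | nil => simp
  | cons j L ih =>
    intro i hi
    simp only [List.foldl_cons]
    rcases List.mem_cons.mp hi with h | h
    · subst h; exact le_trans (foldl_min_le_init g L _) (by omega)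
    · exact ih _ i h

theorem foldl_min_attains (g : Nat → Nat) (L : List Nat) (b : Nat) :
    L.foldl (fun a i => min a (g i)) b = b ∨ ∃ i ∈ L, L.foldl (fun a i => min a (g i)) b = g i := by
  induction L generalizing b with
  | nil => left; rfl
  | cons j L ih =>
    simp only [List.foldl_cons]
    rcases ih (min b (g j)) with h | ⟨i, hi, h⟩
    · by_cases hbg : b ≤ g j
      · left; rw [h]; omega
      · right; exact ⟨j, List.mem_cons_self .., by rw [h]; omega⟩
    · right; exact ⟨i, List.mem_cons_of_mem _ hi, h⟩

theorem pvPats_ne_nil : ∀ k, k < 8 → pvPats.getD k [] ≠ [] := by decide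

theorem startswith_drop_isIn {cs p : List Char} {i : Nat}
    (h : PySem.Chars.startswith (cs.drop i) p = true) : PySem.Chars.isIn p cs = true :=
  (PySem.Chars.exists_prefix_drop_iff_isIn _ _).mp ⟨i, (PySem.Chars.startswith_iff _ _).mp h⟩

theorem isIn_exists_lt {cs p : List Char} (hp : p ≠ []) (h : PySem.Chars.isIn p cs = true) :
    ∃ i, i < cs.length ∧ PySem.Chars.startswith (cs.drop i) p = true := by
  obtain ⟨j, hj⟩ := (PySem.Chars.exists_prefix_drop_iff_isIn _ _).mpr h
  by_cases hjn : j < cs.length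
  · exact ⟨j, hjn, (PySem.Chars.startswith_iff _ _).mpr hj⟩
  · exfalso
    have hnil : cs.drop j = [] := List.drop_eq_nil_of_le (by omega)
    rw [hnil] at hj
    exact hp (List.prefix_nil.mp hj)

-- the position-major fold computes the index of the first occurring pattern
theorem pvBest_eq_pvM (cs : List Char) :
    (List.range cs.length).foldl (fun b i => pvInnerB (cs.drop i) (List.range b) b) 8 = pvM cs := by
  rw [pvFold_eq_min_fold cs _ 8 (le_refl 8)]
  have hrle : (List.range cs.length).foldl (fun a i => min a (pvMAt (cs.drop i))) 8 ≤ 8 :=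
    foldl_min_le_init _ _ 8
  have hMle : pvM cs ≤ 8 := find?_range_getD_le 8 _
  have h1 : pvM cs ≤ (List.range cs.length).foldl (fun a i => min a (pvMAt (cs.drop i))) 8 := by
    rcases foldl_min_attains (fun i => pvMAt (cs.drop i)) (List.range cs.length) 8 with h | ⟨i, hi, h⟩
    · omega
    · by_cases hlt : pvMAt (cs.drop i) < 8
      · have hsw : PySem.Chars.startswith (cs.drop i) (pvPats.getD (pvMAt (cs.drop i)) []) = true := by
          rw [pvMAt] at hlt ⊢
          exact find?_range_sat hlt
        have hin := startswith_drop_isIn hsw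
        rw [h, pvM]
        exact find?_range_le 8 _ _ hlt hin
      · omega
  have h2 : (List.range cs.length).foldl (fun a i => min a (pvMAt (cs.drop i))) 8 ≤ pvM cs := by
    by_cases hM : pvM cs < 8
    · have hin : PySem.Chars.isIn (pvPats.getD (pvM cs) []) cs = true := by
        rw [pvM] at hM ⊢
        exact find?_range_sat hM
      obtain ⟨i, hi, hsw⟩ := isIn_exists_lt (pvPats_ne_nil _ hM) hin
      have hle : pvMAt (cs.drop i) ≤ pvM cs := by
        rw [pvMAt]
        exact find?_range_le 8 _ _ hM hsw
      have hmem : (List.range cs.length).foldl (fun a i => min a (pvMAt (cs.drop i))) 8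
          ≤ pvMAt (cs.drop i) :=
        foldl_min_le_mem (fun i => pvMAt (cs.drop i)) (List.range cs.length) 8 i
          (List.mem_range.mpr hi)
      omega
    · omega
  omega

theorem severity_commands_alt_eq_spec (command : String) :
    severity_commands_alt command =
      if pvM (PySem.Chars.lower command.toList) < 8
      then some (pvResults.getD (pvM (PySem.Chars.lower command.toList)) ("", ""))
      else none := by
  simp only [severity_commands_alt]
  rw [show pvPats.length = 8 from rfl, pvBest_eq_pvM]

-- ===== VERDICT (by name: the statement is the Claim_ definition above) =====
theorem severity_commands_spec : Claim_equal_severity_commands := by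
  intro command _
  unfold Spec_severity_commands
  rw [severity_commands_eq_spec, severity_commands_alt_eq_spec]
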